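-- pv_equiv track=rewrite | github.com/Jasasul/spellchecker | main.py | remove_suffix
-- ===== SOURCE A (Python) =====
-- def remove_suffix(word, special_chars):
--     # removes special characters at the end of the word\
--     has_suffix = False
--     for char in special_chars:
--         if char in word:
--             has_suffix = True
--             break
--     if has_suffix:
--         for i in range(len(word)):
--             if word[i] in special_chars:
--                 break
--         no_special = word[:i]
--         suffix = word[i:]
--         return suffix, no_special
--     return '', word
-- ===== SOURCE B (Python) =====
-- def remove_suffix(word, special_chars):
--     # iterate over special_chars: first position of each present special char, then min
--     positions = [word.index(c) for c in special_chars if c in word]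
--     if positions:
--         i = min(positions)
--         return word[i:], word[:i]
--     return '', word
-- ===== Notes on version B (the rewrite author's own statement) =====
-- stated objective: alternative
-- what changed: B iterates over special_chars instead of word: it collects the first position of each special char present in word and reduces with min, replacing A's presence scan followed by an index scan over word.
import Mathlib
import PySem

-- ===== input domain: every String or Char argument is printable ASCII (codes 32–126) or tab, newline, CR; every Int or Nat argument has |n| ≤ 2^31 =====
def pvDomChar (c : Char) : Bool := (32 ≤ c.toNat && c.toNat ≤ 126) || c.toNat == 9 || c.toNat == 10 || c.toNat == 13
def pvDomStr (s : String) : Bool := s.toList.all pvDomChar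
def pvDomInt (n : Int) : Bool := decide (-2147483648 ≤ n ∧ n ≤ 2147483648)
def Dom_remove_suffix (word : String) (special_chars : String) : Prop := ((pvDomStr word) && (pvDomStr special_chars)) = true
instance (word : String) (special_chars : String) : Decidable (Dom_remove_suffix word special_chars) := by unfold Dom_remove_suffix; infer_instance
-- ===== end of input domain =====

-- B iterates over special_chars (first position of each present char, reduced with min)
-- instead of A's two scans (presence scan, then index scan over word); objective: alternative decomposition, not speed.

-- ===== PORT A =====
-- A's first loop: 'for char in special_chars: if char in word: has_suffix = True; break'
def pvHasSuffixA (w : List Char) : List Char → Bool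
  | [] => false
  | c :: rest => if PySem.Chars.isIn [c] w then true else pvHasSuffixA w rest

-- A's second loop: 'for i in range(len(word)): if word[i] in special_chars: break';
-- when no break fires Python leaves i at len(word) - 1, hence the n - 1 fallback
def pvBreakIdxA (s : List Char) : List Char → Nat → Nat → Nat
  | [], _, n => n - 1
  | c :: rest, i, n => if PySem.Chars.isIn [c] s then i else pvBreakIdxA s rest (i + 1) n

def remove_suffix (word : String) (special_chars : String) : String × String :=
  if pvHasSuffixA word.toList special_chars.toList then
    (String.ofList (PySem.Chars.slice word.toList
        (some ((pvBreakIdxA special_chars.toList word.toList 0 word.toList.length : Nat) : Int)) none),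
     String.ofList (PySem.Chars.slice word.toList none
        (some ((pvBreakIdxA special_chars.toList word.toList 0 word.toList.length : Nat) : Int))))
  else ("", word)

-- ===== PORT B =====
-- positions = [word.index(c) for c in special_chars if c in word]
def pvPositionsB (w : List Char) (s : List Char) : List Int :=
  s.filterMap (fun c => if PySem.Chars.isIn [c] w then some (PySem.Chars.find w [c]) else none)

def remove_suffix_alt (word : String) (special_chars : String) : String × String :=
  match PySem.List.min? (pvPositionsB word.toList special_chars.toList) (fun x => x) with
  | some i => (String.ofList (PySem.Chars.slice word.toList (some i) none),
               String.ofList (PySem.Chars.slice word.toList none (some i)))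
  | none => ("", word)

-- ===== PRECONDITION & SPEC =====
def Spec_remove_suffix (word : String) (special_chars : String) (out : String × String) : Prop := out = remove_suffix_alt word special_chars
instance (word : String) (special_chars : String) (out : String × String) : Decidable (Spec_remove_suffix word special_chars out) := by unfold Spec_remove_suffix; infer_instance

-- ===== CLAIM (what is proved, stated in full; the proofs are below) =====
def Claim_equal_remove_suffix : Prop := ∀ (word : String) (special_chars : String), Dom_remove_suffix word special_chars → Spec_remove_suffix word special_chars (remove_suffix word special_chars)

-- ===== LEMMAS AND PROOFS =====

-- 'c in str' for a single character is list membership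
theorem pvIsIn_singleton (c : Char) (s : List Char) : PySem.Chars.isIn [c] s = true ↔ c ∈ s := by
  rw [PySem.Chars.isIn_iff_infix]; exact List.singleton_infix_iff c s

theorem pvSingleton_prefix (c : Char) (l : List Char) : [c] <+: l ↔ l.head? = some c := by
  cases l with
  | nil => simp
  | cons a t =>
    constructor
    · rintro ⟨u, hu⟩
      simp only [List.singleton_append, List.cons.injEq] at hu
      simp [hu.1]
    · intro h
      simp only [List.head?_cons, Option.some.injEq] at h
      exact ⟨t, by simp [h]⟩

theorem pvHasSuffixA_iff (w s : List Char) :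
    pvHasSuffixA w s = true ↔ ∃ c ∈ s, c ∈ w := by
  induction s with
  | nil => simp [pvHasSuffixA]
  | cons c rest ih =>
    by_cases h : PySem.Chars.isIn [c] w = true
    · simp [pvHasSuffixA, h]
      exact Or.inl ((pvIsIn_singleton c w).mp h)
    · simp only [pvHasSuffixA, if_neg h, ih, List.mem_cons]
      constructor
      · rintro ⟨d, hd, hdw⟩; exact ⟨d, Or.inr hd, hdw⟩
      · rintro ⟨d, hd | hd, hdw⟩
        · exact absurd ((pvIsIn_singleton c w).mpr (hd ▸ hdw)) h
        · exact ⟨d, hd, hdw⟩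

theorem pvBreakIdxA_eq (s : List Char) (rest : List Char) (i n : Nat)
    (h : rest.any (fun ch => PySem.Chars.isIn [ch] s) = true) :
    pvBreakIdxA s rest i n = i + rest.findIdx (fun ch => PySem.Chars.isIn [ch] s) := by
  induction rest generalizing i with
  | nil => simp at h
  | cons c r ih =>
    by_cases hc : PySem.Chars.isIn [c] s = true
    · simp [pvBreakIdxA, hc, List.findIdx_cons]
    · have hc' : PySem.Chars.isIn [c] s = false := by simpa using hc
      simp only [List.any_cons, hc', Bool.false_or] at h
      rw [List.findIdx_cons, hc']
      simp only [pvBreakIdxA, hc', Bool.false_eq_true, if_false, cond_false]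
      rw [ih (i + 1) h]
      omega

theorem pvPositions_mem (w s : List Char) (x : Int) :
    x ∈ pvPositionsB w s ↔ ∃ c ∈ s, c ∈ w ∧ x = PySem.Chars.find w [c] := by
  simp only [pvPositionsB, List.mem_filterMap]
  constructor
  · rintro ⟨c, hc, hx⟩
    by_cases h : PySem.Chars.isIn [c] w = true
    · rw [if_pos h] at hx
      exact ⟨c, hc, (pvIsIn_singleton c w).mp h, (Option.some.injEq _ _).mp hx |>.symm⟩
    · rw [if_neg h] at hx; cases hx
  · rintro ⟨c, hc, hcw, rfl⟩
    exact ⟨c, hc, by rw [if_pos ((pvIsIn_singleton c w).mpr hcw)]⟩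

-- the key fact: min of the per-character first positions = first index whose char is special
theorem pvMin_eq_findIdx (w s : List Char) (hEx : ∃ c ∈ s, c ∈ w) :
    PySem.List.min? (pvPositionsB w s) (fun x => x)
      = some ((w.findIdx (fun ch => PySem.Chars.isIn [ch] s) : Nat) : Int) := by
  set p : Char → Bool := fun ch => PySem.Chars.isIn [ch] s with hp
  set k : Nat := w.findIdx p with hk
  obtain ⟨c0, hc0s, hc0w⟩ := hEx
  have hwany : ∃ x ∈ w, p x = true := ⟨c0, hc0w, (pvIsIn_singleton c0 s).mpr hc0s⟩
  have hklt : k < w.length := List.findIdx_lt_length_of_exists hwany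
  -- lower bound: every position is ≥ k
  have hlb : ∀ x ∈ pvPositionsB w s, (k : Int) ≤ x := by
    intro x hx
    obtain ⟨c, hcs, hcw, rfl⟩ := (pvPositions_mem w s x).mp hx
    have hnn : 0 ≤ PySem.Chars.find w [c] :=
      (PySem.Chars.find_nonneg_iff w [c]).mpr (List.singleton_infix_iff c w |>.mpr hcw)
    obtain ⟨hpre, _⟩ := PySem.Chars.find_spec (s := w) (sub := [c]) hnn
    have hget : w[(PySem.Chars.find w [c]).toNat]? = some c := by
      rw [← List.head?_drop]; exact (pvSingleton_prefix c _).mp hpre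
    have hlt : (PySem.Chars.find w [c]).toNat < w.length := by
      by_contra hge
      rw [List.getElem?_eq_none (by omega)] at hget; cases hget
    have hkle : k ≤ (PySem.Chars.find w [c]).toNat := by
      by_contra hgt
      rw [List.getElem?_eq_getElem hlt] at hget
      have hc : w[(PySem.Chars.find w [c]).toNat]'hlt = c := by injection hget
      have hfalse : p (w[(PySem.Chars.find w [c]).toNat]'hlt) = false :=
        List.not_of_lt_findIdx (p := p) (xs := w) (by omega : (PySem.Chars.find w [c]).toNat < w.findIdx p)
      rw [hc] at hfalse
      simp only [hp] at hfalse
      rw [(pvIsIn_singleton c s).mpr hcs] at hfalse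
      cases hfalse
    omega
  -- the char at k gives a position ≤ k
  have hpk : p w[k] = true := List.findIdx_getElem (w := hklt)
  have hcks : w[k] ∈ s := (pvIsIn_singleton _ s).mp hpk
  have hckw : w[k] ∈ w := List.getElem_mem hklt
  have hmem : PySem.Chars.find w [w[k]] ∈ pvPositionsB w s :=
    (pvPositions_mem w s _).mpr ⟨w[k], hcks, hckw, rfl⟩
  have hub : PySem.Chars.find w [w[k]] ≤ (k : Int) := by
    have hnn : 0 ≤ PySem.Chars.find w [w[k]] :=
      (PySem.Chars.find_nonneg_iff w [w[k]]).mpr (List.singleton_infix_iff _ w |>.mpr hckw)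
    obtain ⟨_, hmin⟩ := PySem.Chars.find_spec (s := w) (sub := [w[k]]) hnn
    by_contra hgt
    have hklt2 : k < (PySem.Chars.find w [w[k]]).toNat := by omega
    exact hmin k hklt2 ((pvSingleton_prefix _ _).mpr (by rw [List.head?_drop, List.getElem?_eq_getElem hklt]))
  -- positions nonempty, so min? = some m, and m = k
  cases hmq : PySem.List.min? (pvPositionsB w s) (fun x => x) with
  | none =>
    rw [PySem.List.min?_eq_none_iff] at hmq
    rw [hmq] at hmem; cases hmem
  | some m =>
    have hmmem := PySem.List.min?_mem hmq
    have h1 : (k : Int) ≤ m := hlb m hmmem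
    have h2 : m ≤ PySem.Chars.find w [w[k]] := PySem.List.min?_isMin hmq _ hmem
    have : m = (k : Int) := le_antisymm (le_trans h2 hub) h1
    rw [this]

-- ===== VERDICT (by name: the statement is the Claim_ definition above) =====
theorem remove_suffix_spec : Claim_equal_remove_suffix := by
  intro word special_chars _
  unfold Spec_remove_suffix remove_suffix remove_suffix_alt
  by_cases hhs : pvHasSuffixA word.toList special_chars.toList = true
  · have hEx := (pvHasSuffixA_iff word.toList special_chars.toList).mp hhs
    rw [if_pos hhs, pvMin_eq_findIdx word.toList special_chars.toList hEx]
    have hany : word.toList.any (fun ch => PySem.Chars.isIn [ch] special_chars.toList) = true := by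
      obtain ⟨c, hcs, hcw⟩ := hEx
      exact List.any_eq_true.mpr ⟨c, hcw, (pvIsIn_singleton c special_chars.toList).mpr hcs⟩
    rw [pvBreakIdxA_eq special_chars.toList word.toList 0 word.toList.length hany]
    simp
  · rw [if_neg hhs]
    have hpos : pvPositionsB word.toList special_chars.toList = [] := by
      by_contra hne
      obtain ⟨x, hx⟩ := List.exists_mem_of_ne_nil _ hne
      obtain ⟨c, hcs, hcw, _⟩ := (pvPositions_mem word.toList special_chars.toList x).mp hx
      exact hhs ((pvHasSuffixA_iff word.toList special_chars.toList).mpr ⟨c, hcs, hcw⟩)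
    rw [hpos]
    have hnone : PySem.List.min? ([] : List Int) (fun x => x) = none :=
      (PySem.List.min?_eq_none_iff _ _).mpr rfl
    rw [hnone]
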